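-- pv_equiv track=rewrite | github.com/LeaveSHY/AdaptiveBFT-Supplement | scripts/build_submission_rc.py | parse_fastlane_status
-- ===== SOURCE A (Python) =====
-- from typing import List
--
-- def parse_fastlane_status(fastlane_md: str) -> str:
--     if not fastlane_md.strip():
--         return "UNKNOWN"
--     statuses: List[str] = []
--     for line in fastlane_md.splitlines():
--         line = line.strip()
--         if not line.startswith("|") or line.startswith("|---") or line.startswith("| Step |"):
--             continue
--         parts = [p.strip() for p in line.strip("|").split("|")]
--         if len(parts) < 5:
--             continue
--         statuses.append(parts[2])
--     if not statuses:
--         return "UNKNOWN"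
--     if any(s == "FAIL" for s in statuses):
--         return "FAIL"
--     if any(s == "PASS" for s in statuses):
--         return "PASS"
--     return "UNKNOWN"
-- ===== SOURCE B (Python) =====
-- def parse_fastlane_status(fastlane_md: str) -> str:
--     if not fastlane_md.strip():
--         return "UNKNOWN"
--     saw_pass = False
--     for line in fastlane_md.splitlines():
--         line = line.strip()
--         if not line.startswith("|") or line.startswith("|---") or line.startswith("| Step |"):
--             continue
--         parts = [p.strip() for p in line.strip("|").split("|")]
--         if len(parts) < 5:
--             continue
--         status = parts[2]
--         if status == "FAIL":
--             return "FAIL"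
--         if status == "PASS":
--             saw_pass = True
--     return "PASS" if saw_pass else "UNKNOWN"
-- ===== Notes on version B (the rewrite author's own statement) =====
-- stated objective: simpler
-- what changed: Instead of collecting all row statuses into a list and then running two any() scans over it, B keeps a single saw_pass boolean in one pass and returns FAIL immediately when a FAIL row is seen (FAIL > PASS > UNKNOWN priority folded into the loop).
import Mathlib
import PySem

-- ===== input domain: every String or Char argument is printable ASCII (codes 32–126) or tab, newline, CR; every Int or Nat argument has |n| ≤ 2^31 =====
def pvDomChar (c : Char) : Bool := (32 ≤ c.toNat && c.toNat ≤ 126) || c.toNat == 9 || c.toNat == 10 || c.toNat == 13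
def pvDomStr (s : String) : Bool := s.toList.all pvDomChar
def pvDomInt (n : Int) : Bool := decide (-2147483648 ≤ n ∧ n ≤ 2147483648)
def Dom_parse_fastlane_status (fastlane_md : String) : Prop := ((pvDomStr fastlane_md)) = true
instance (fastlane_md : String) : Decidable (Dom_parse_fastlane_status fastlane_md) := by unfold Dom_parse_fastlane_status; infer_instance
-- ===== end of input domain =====

-- B replaces A's collect-then-two-any()-scans with a single pass keeping one boolean and
-- returning "FAIL" immediately (objective: simpler, same line-filtering logic).

-- row filter shared by both Pythons verbatim: strip the line, skip non-table/header/separator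
-- lines, split the '|'-stripped line on '|', strip the parts, require ≥ 5 parts, take parts[2]
def pvRowStatus (line : String) : Option String :=
  let line := PySem.Str.strip line
  if !(PySem.Str.startswith line "|") || PySem.Str.startswith line "|---"
      || PySem.Str.startswith line "| Step |" then none
  else
    -- split? is `some` here since the separator "|" is nonempty
    let parts := ((PySem.Str.split? (PySem.Str.stripChars line "|") "|").getD []).map PySem.Str.strip
    if parts.length < 5 then none
    else some ((PySem.List.pyGet? parts 2).getD "")  -- parts[2]; exact: length ≥ 5 here

-- ===== PORT A =====
def parse_fastlane_status (fastlane_md : String) : String :=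
  if PySem.Str.strip fastlane_md = "" then "UNKNOWN"
  else
    let statuses := (PySem.Str.splitlines fastlane_md).foldl
      (fun acc line => match pvRowStatus line with
        | some s => acc ++ [s]
        | none => acc) []
    if statuses = [] then "UNKNOWN"
    else if statuses.any (· == "FAIL") then "FAIL"
    else if statuses.any (· == "PASS") then "PASS"
    else "UNKNOWN"

-- ===== PORT B =====
def pvAltLoop : List String → Bool → String
  | [], sawPass => if sawPass then "PASS" else "UNKNOWN"
  | line :: rest, sawPass =>
    match pvRowStatus line with
    | none => pvAltLoop rest sawPass
    | some s =>
      if s = "FAIL" then "FAIL"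
      else pvAltLoop rest (sawPass || s == "PASS")

def parse_fastlane_status_alt (fastlane_md : String) : String :=
  if PySem.Str.strip fastlane_md = "" then "UNKNOWN"
  else pvAltLoop (PySem.Str.splitlines fastlane_md) false

-- ===== PRECONDITION & SPEC =====
def Spec_parse_fastlane_status (fastlane_md : String) (out : String) : Prop := out = parse_fastlane_status_alt fastlane_md
instance (fastlane_md : String) (out : String) : Decidable (Spec_parse_fastlane_status fastlane_md out) := by unfold Spec_parse_fastlane_status; infer_instance

-- ===== CLAIM (what is proved, stated in full; the proofs are below) =====
def Claim_equal_parse_fastlane_status : Prop := ∀ (fastlane_md : String), Dom_parse_fastlane_status fastlane_md → Spec_parse_fastlane_status fastlane_md (parse_fastlane_status fastlane_md)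

-- ===== LEMMAS AND PROOFS =====

-- A's status-collecting loop builds exactly the filterMap of the rows
lemma pvFoldl_statuses (lines : List String) (acc : List String) :
    lines.foldl (fun acc line => match pvRowStatus line with
        | some s => acc ++ [s]
        | none => acc) acc = acc ++ lines.filterMap pvRowStatus := by
  induction lines generalizing acc with
  | nil => simp
  | cons l rest ih =>
    cases h : pvRowStatus l <;> simp [List.foldl, h, ih]

-- B's loop computes the FAIL > PASS > UNKNOWN verdict of the filtered statuses
lemma pvAltLoop_char (lines : List String) (sp : Bool) :
    pvAltLoop lines sp =
      (let sts := lines.filterMap pvRowStatus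
       if sts.any (· == "FAIL") then "FAIL"
       else if sp || sts.any (· == "PASS") then "PASS"
       else "UNKNOWN") := by
  induction lines generalizing sp with
  | nil => simp [pvAltLoop]
  | cons l rest ih =>
    cases h : pvRowStatus l with
    | none => simp [pvAltLoop, h, ih]
    | some s =>
      by_cases hf : s = "FAIL"
      · simp [pvAltLoop, h, hf]
      · simp only [pvAltLoop, h, hf, ih, List.filterMap_cons, List.any_cons]
        simp [hf]
        by_cases hp : s = "PASS" <;> simp [hp]

-- ===== VERDICT (by name: the statement is the Claim_ definition above) =====
theorem parse_fastlane_status_spec : Claim_equal_parse_fastlane_status := by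
  intro md _
  unfold Spec_parse_fastlane_status parse_fastlane_status parse_fastlane_status_alt
  by_cases h0 : PySem.Str.strip md = ""
  · simp [h0]
  · simp only [h0, if_false, pvFoldl_statuses, List.nil_append, pvAltLoop_char]
    cases hsts : (PySem.Str.splitlines md).filterMap pvRowStatus with
    | nil => simp
    | cons s rest => simp
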